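-- pv_equiv track=rewrite | github.com/Raoof128/SDRF | detectors/github_token_detector.py | validate_github_token
-- ===== SOURCE A (Python) =====
-- def validate_github_token(token: str, token_type: str) -> bool:
--     """Validate GitHub token format."""
--     validations = {
--         "ghp_": lambda t: len(t) == 40 and t.startswith("ghp_"),
--         "github_pat_": lambda t: len(t) == 82 and t.startswith("github_pat_"),
--         "gho_": lambda t: len(t) == 40 and t.startswith("gho_"),
--         "ghs_": lambda t: len(t) == 40 and t.startswith("ghs_"),
--         "ghr_": lambda t: len(t) == 40 and t.startswith("ghr_"),
--         "ghu_": lambda t: len(t) == 40 and t.startswith("ghu_"),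
--         "npm_": lambda t: len(t) == 40 and t.startswith("npm_"),
--     }
--
--     for prefix, validator in validations.items():
--         if token.startswith(prefix):
--             return validator(token)
--
--     return False
-- ===== SOURCE B (Python) =====
-- def validate_github_token(token: str, token_type: str) -> bool:
--     """Validate GitHub token format (closed-form, no loop)."""
--     if token.startswith("github_pat_"):
--         return len(token) == 82
--     return len(token) == 40 and token[:4] in {"ghp_", "gho_", "ghs_", "ghr_", "ghu_", "npm_"}
-- ===== Notes on version B (the rewrite author's own statement) =====
-- stated objective: simpler
-- what changed: Replaced the loop over a dict of per-prefix lambda validators by a single closed-form boolean: one startswith check for the long github_pat_ prefix, else a length-40 test plus a 4-character-slice set membership; valid because no prefix overlaps another.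
import Mathlib
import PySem

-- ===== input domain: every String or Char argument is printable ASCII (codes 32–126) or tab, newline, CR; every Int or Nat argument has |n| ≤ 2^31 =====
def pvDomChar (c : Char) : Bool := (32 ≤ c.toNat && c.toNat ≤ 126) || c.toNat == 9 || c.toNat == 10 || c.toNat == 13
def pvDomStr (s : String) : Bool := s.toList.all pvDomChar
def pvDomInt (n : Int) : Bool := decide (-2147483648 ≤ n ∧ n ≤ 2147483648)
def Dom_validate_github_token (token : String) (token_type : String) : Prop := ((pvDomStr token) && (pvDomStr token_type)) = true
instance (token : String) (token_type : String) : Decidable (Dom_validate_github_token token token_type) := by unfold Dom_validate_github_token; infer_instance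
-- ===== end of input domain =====

-- B replaces A's loop over a dict of per-prefix lambda validators by one closed-form boolean (objective: simpler).

-- ===== PORT A =====
-- the dict iteration: the first prefix that matches decides, via its validator
def pvGoA : List (String × (String → Bool)) → String → Bool
  | [], _ => false
  | (p, v) :: rest, t => if PySem.Str.startswith t p then v t else pvGoA rest t

def validate_github_token (token : String) (token_type : String) : Bool :=
  let validations : List (String × (String → Bool)) :=
    [("ghp_", fun t => decide (PySem.Str.len t = 40) && PySem.Str.startswith t "ghp_"),
     ("github_pat_", fun t => decide (PySem.Str.len t = 82) && PySem.Str.startswith t "github_pat_"),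
     ("gho_", fun t => decide (PySem.Str.len t = 40) && PySem.Str.startswith t "gho_"),
     ("ghs_", fun t => decide (PySem.Str.len t = 40) && PySem.Str.startswith t "ghs_"),
     ("ghr_", fun t => decide (PySem.Str.len t = 40) && PySem.Str.startswith t "ghr_"),
     ("ghu_", fun t => decide (PySem.Str.len t = 40) && PySem.Str.startswith t "ghu_"),
     ("npm_", fun t => decide (PySem.Str.len t = 40) && PySem.Str.startswith t "npm_")]
  pvGoA validations token

-- ===== PORT B =====
def validate_github_token_alt (token : String) (token_type : String) : Bool :=
  if PySem.Str.startswith token "github_pat_" then decide (PySem.Str.len token = 82)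
  else decide (PySem.Str.len token = 40) &&
       ["ghp_", "gho_", "ghs_", "ghr_", "ghu_", "npm_"].contains (PySem.Str.slice token none (some 4))

-- ===== PRECONDITION & SPEC =====
def Spec_validate_github_token (token : String) (token_type : String) (out : Bool) : Prop := out = validate_github_token_alt token token_type
instance (token : String) (token_type : String) (out : Bool) : Decidable (Spec_validate_github_token token token_type out) := by unfold Spec_validate_github_token; infer_instance

-- ===== CLAIM (what is proved, stated in full; the proofs are below) =====
def Claim_equal_validate_github_token : Prop := ∀ (token : String) (token_type : String), Dom_validate_github_token token token_type → Spec_validate_github_token token token_type (validate_github_token token token_type)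

-- ===== LEMMAS AND PROOFS =====
theorem pv_eq_main (token tt : String) :
    validate_github_token token tt = validate_github_token_alt token tt := by
  have hsw : ∀ pl : List Char, PySem.Chars.startswith token.toList pl = true ↔ pl = token.toList.take pl.length := by
    intro pl; rw [PySem.Chars.startswith_iff, List.prefix_iff_eq_take]
  have hmem : ∀ p : String, (PySem.Str.slice token none (some 4) = p) ↔ p.toList = token.toList.take 4 := by
    intro p
    rw [← String.toList_inj]
    simp [PySem.List.slice_to]
    exact eq_comm
  have swb : ∀ pl : List Char, PySem.Chars.startswith token.toList pl = decide (pl = token.toList.take pl.length) := by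
    intro pl; by_cases h : pl = token.toList.take pl.length
    · rw [(hsw pl).mpr h, decide_eq_true h]
    · rw [decide_eq_false h, ← Bool.not_eq_true]
      simpa [hsw] using h
  have htt : (token.toList.take 11).take 4 = token.toList.take 4 := by simp [List.take_take]
  unfold validate_github_token validate_github_token_alt
  simp only [pvGoA, PySem.Str.startswith_eq, List.contains_eq_mem, List.mem_cons,
    List.not_mem_nil, or_false, swb, hmem,
    show ("ghp_" : String).toList = ['g','h','p','_'] from rfl,
    show ("github_pat_" : String).toList = ['g','i','t','h','u','b','_','p','a','t','_'] from rfl,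
    show ("gho_" : String).toList = ['g','h','o','_'] from rfl,
    show ("ghs_" : String).toList = ['g','h','s','_'] from rfl,
    show ("ghr_" : String).toList = ['g','h','r','_'] from rfl,
    show ("ghu_" : String).toList = ['g','h','u','_'] from rfl,
    show ("npm_" : String).toList = ['n','p','m','_'] from rfl,
    List.length_cons, List.length_nil]
  norm_num
  by_cases hpat : (['g','i','t','h','u','b','_','p','a','t','_'] : List Char) = token.toList.take 11
  · have h4 : token.toList.take 4 = ['g','i','t','h'] := by rw [← htt, ← hpat]; decide
    simp [← hpat, h4]
  · simp only [hpat, if_false]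
    by_cases h1 : (['g','h','p','_'] : List Char) = token.toList.take 4 <;>
    by_cases h2 : (['g','h','o','_'] : List Char) = token.toList.take 4 <;>
    by_cases h3 : (['g','h','s','_'] : List Char) = token.toList.take 4 <;>
    by_cases h4 : (['g','h','r','_'] : List Char) = token.toList.take 4 <;>
    by_cases h5 : (['g','h','u','_'] : List Char) = token.toList.take 4 <;>
    by_cases h6 : (['n','p','m','_'] : List Char) = token.toList.take 4 <;>
    simp_all

-- ===== VERDICT (by name: the statement is the Claim_ definition above) =====
theorem validate_github_token_spec : Claim_equal_validate_github_token := by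
  intro token token_type _
  exact pv_eq_main token token_type
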